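-- pv_equiv track=rewrite | github.com/Uttejreddy0496/Methods-and-Tools-for-Software-Engineering | functs.py | coor_check2
-- ===== SOURCE A (Python) =====
-- def coor_check2(coordinates):
--     coordinates=coordinates.replace(" ","")
--     space=[]
--     for x in range(0,len(coordinates)):
--         if coordinates[x].strip()=="(":
--             space.append(x)
--     else:
--         None
--     for x in space[1:]:
--         if coordinates[x-1] != ")":
--             r=1
--             break
--         else:
--             r=0
--     return r
-- ===== SOURCE B (Python) =====
-- def coor_check2(coordinates):
--     # single pass: judge each opening parenthesis after the first by the character
--     # preceding it (spaces removed); like the original, r stays unbound when there is no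
--     # second opening parenthesis and the final return raises UnboundLocalError
--     s = coordinates.replace(" ", "")
--     seen_open = False
--     prev = ""
--     for c in s:
--         if c == "(" and seen_open:
--             r = 1 if prev != ")" else 0
--             if r:
--                 break
--         if c == "(":
--             seen_open = True
--         prev = c
--     return r
-- ===== Notes on version B (the rewrite author's own statement) =====
-- stated objective: simpler
-- what changed: Replaced A's two passes (collect all opening-parenthesis indices into a list, then re-index the string over that list with a break) by one direct pass over the characters carrying (seen_open, prev) state, with no index list and no indexing.
import Mathlib
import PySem

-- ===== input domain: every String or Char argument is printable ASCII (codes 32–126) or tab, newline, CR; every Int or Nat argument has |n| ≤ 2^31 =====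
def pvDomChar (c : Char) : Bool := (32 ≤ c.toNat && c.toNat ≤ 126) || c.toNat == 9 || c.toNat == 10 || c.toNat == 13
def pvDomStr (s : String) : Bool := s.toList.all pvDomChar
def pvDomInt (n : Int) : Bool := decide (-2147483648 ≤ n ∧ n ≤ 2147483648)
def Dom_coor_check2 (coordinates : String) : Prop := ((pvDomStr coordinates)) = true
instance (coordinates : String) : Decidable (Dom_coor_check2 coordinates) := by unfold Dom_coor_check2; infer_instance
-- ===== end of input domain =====

-- B replaces A's two passes (collect all opening-parenthesis indices, then re-check the string at each
-- collected index) by one direct pass over the characters carrying flags ('simpler').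

-- ===== PORT A =====
-- A's second loop 'for x in space[1:]: …'; none = r never assigned
-- (Python raises UnboundLocalError by the final return), excluded by Pre_
def coorA_loop (s : List Char) : List Int → Option Int
  | [] => none
  | x :: xs =>
      -- coordinates[x-1]: x is the index of a non-first opening parenthesis, so 1 ≤ x < len(s) and
      -- the access never raises; pyGetD with an arbitrary default is exact here
      if PySem.List.pyGetD s (x - 1) ' ' ≠ ')' then some 1          -- r = 1; break
      else some ((coorA_loop s xs).getD 0)                          -- r = 0; continue

def coor_check2 (coordinates : String) : Int :=
  let s := (PySem.Str.replace coordinates " " "").toList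
  -- first loop: space = indices x with coordinates[x].strip() == "("
  let space : List Int := (PySem.List.pyRange 0 (PySem.List.len s) 1).foldl
      (fun acc x => if PySem.Chars.strip [PySem.List.pyGetD s x ' '] == ['('] then acc ++ [x] else acc) []
  match coorA_loop s (PySem.List.slice space (some 1) none) with
  | some r => r
  | none => 0          -- Python raises UnboundLocalError here; excluded by Pre_

-- ===== PORT B =====
-- single pass; prev : Option Char models Python's prev (none = "", before the first
-- char); the Option Int result models r: none = r never assigned (Python raises
-- UnboundLocalError at the final return), excluded by Pre_
def coorB_loop (l : List Char) (seen_open : Bool) (prev : Option Char) (r : Option Int) : Option Int :=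
  match l with
  | [] => r
  | c :: rest =>
      if c == '(' && seen_open then
        let r' : Int := if !(prev == some ')') then 1 else 0
        if r' ≠ 0 then some r'                                  -- if r: break
        else coorB_loop rest true (some c) (some r')
      else
        let seen' := if c == '(' then true else seen_open
        coorB_loop rest seen' (some c) r

def coor_check2_alt (coordinates : String) : Int :=
  let s := (PySem.Str.replace coordinates " " "").toList
  match coorB_loop s false none none with
  | some r => r
  | none => 0          -- Python raises UnboundLocalError here; excluded by Pre_

-- ===== PRECONDITION & SPEC =====
-- Pre_ excludes exactly the inputs with fewer than two opening parentheses after removing spaces: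
-- there neither program ever assigns r and both raise UnboundLocalError at the final return.
def Pre_coor_check2 (coordinates : String) : Prop :=
  2 ≤ (PySem.Str.replace coordinates " " "").toList.count '('
instance (coordinates : String) : Decidable (Pre_coor_check2 coordinates) := by
  unfold Pre_coor_check2; infer_instance

def pvWitness_coor_check2 : String := "(1,2),( 3,4)"

def Spec_coor_check2 (coordinates : String) (out : Int) : Prop := out = coor_check2_alt coordinates
instance (coordinates : String) (out : Int) : Decidable (Spec_coor_check2 coordinates out) := by
  unfold Spec_coor_check2; infer_instance

-- ===== CLAIM (what is proved, stated in full; the proofs are below) =====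
def Claim_equal_coor_check2 : Prop := ∀ (coordinates : String), Dom_coor_check2 coordinates → Pre_coor_check2 coordinates → Spec_coor_check2 coordinates (coor_check2 coordinates)

-- ===== LEMMAS AND PROOFS =====

-- positions of the opening parentheses in s (proof-side view of A's 'space' list)
def idxOpen (s : List Char) : List Nat :=
  (List.range s.length).filter (fun k => s.getD k ' ' == '(')

-- result of B's scan once an opening parenthesis has been seen, with prev the previous char
def specG (prev : Option Char) : List Char → Bool
  | [] => false
  | c :: r => (c == '(' && !(prev == some ')')) || specG (some c) r

-- result of B's scan before the first opening parenthesis has been seen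
def specH : List Char → Bool
  | [] => false
  | c :: r => if c == '(' then specG (some c) r else specH r

theorem strip_single (c : Char) : (PySem.Chars.strip [c] == ['(']) = (c == '(') := by
  by_cases h : PySem.Chars.isspace c = true
  · have hc : c ≠ '(' := by intro e; subst e; exact absurd h (by decide)
    simp [PySem.Chars.strip, PySem.Chars.lstrip, PySem.Chars.rstrip, h, hc]
  · have h' : PySem.Chars.isspace c = false := by simpa using h
    simp [PySem.Chars.strip, PySem.Chars.lstrip, PySem.Chars.rstrip, h']

theorem space_eq (s : List Char) :
    (PySem.List.pyRange 0 (PySem.List.len s) 1).foldl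
      (fun acc x => if PySem.Chars.strip [PySem.List.pyGetD s x ' '] == ['('] then acc ++ [x] else acc) []
    = (idxOpen s).map (fun (k : Nat) => (k : Int)) := by
  rw [PySem.List.foldl_append_if_eq_filter]
  simp [PySem.List.pyRange_one, List.filter_map, Function.comp_def, strip_single, idxOpen,
    List.getD_eq_getElem?_getD]

theorem idxOpen_pairwise (s : List Char) : (idxOpen s).Pairwise (· < ·) :=
  List.Pairwise.filter _ List.pairwise_lt_range

theorem idxOpen_drop_pos (s : List Char) : ∀ k ∈ (idxOpen s).drop 1, 1 ≤ k := by
  have hp := idxOpen_pairwise s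
  cases h : idxOpen s with
  | nil => simp
  | cons a t =>
      rw [h] at hp
      intro k hk
      simp only [List.drop_succ_cons, List.drop_zero] at hk
      have := (List.pairwise_cons.mp hp).1 k hk
      omega

theorem coorA_loop_map (s : List Char) (l : List Nat) (hl : ∀ k ∈ l, 1 ≤ k) :
    (coorA_loop s (l.map (fun (k : Nat) => (k : Int)))).getD 0
      = if l.any (fun k => !(s.getD (k - 1) ' ' == ')')) then 1 else 0 := by
  induction l with
  | nil => rfl
  | cons k t ih =>
      have hk : 1 ≤ k := hl k (by simp)
      have hcast : (k : Int) - 1 = ((k - 1 : Nat) : Int) := by omega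
      rw [List.map_cons, coorA_loop]
      simp only [hcast, PySem.List.pyGetD_natCast]
      by_cases hb : s.getD (k - 1) ' ' = ')'
      · have hbe : s[k - 1]?.getD ' ' = ')' := by
          rw [← List.getD_eq_getElem?_getD]; exact hb
        have hb' : (!(s.getD (k - 1) ' ' == ')')) = false := by
          simp [List.getD_eq_getElem?_getD, hbe]
        rw [if_neg (by simp [List.getD_eq_getElem?_getD, hbe]), Option.getD_some,
          List.any_cons, hb', Bool.false_or]
        exact ih (fun x hx => hl x (by simp [hx]))
      · have hbe : ¬ s[k - 1]?.getD ' ' = ')' := by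
          rw [← List.getD_eq_getElem?_getD]; exact hb
        have hb' : (!(s.getD (k - 1) ' ' == ')')) = true := by
          simp [List.getD_eq_getElem?_getD, hbe]
        rw [if_pos hb, Option.getD_some, List.any_cons, hb', Bool.true_or, if_pos rfl]

theorem idxOpen_cons (c : Char) (t : List Char) :
    idxOpen (c :: t) = (if c == '(' then [0] else []) ++ (idxOpen t).map Nat.succ := by
  simp only [idxOpen, List.length_cons, List.range_succ_eq_map, List.filter_cons,
    List.getD_cons_zero, List.filter_map]
  by_cases hc : c = '('
  · simp [hc, Function.comp_def]
  · simp [hc, Function.comp_def]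

theorem specG_eq (r : List Char) : ∀ c : Char,
    ((idxOpen r).any fun k => !((c :: r).getD k ' ' == ')')) = specG (some c) r := by
  induction r with
  | nil => intro c; simp [idxOpen, specG]
  | cons d r' ih =>
      intro c
      rw [idxOpen_cons]
      by_cases hd : d = '('
      · have hd' : (d == '(') = true := by simp [hd]
        simp only [hd', if_true, List.singleton_append, List.any_cons, List.any_map,
          Function.comp_def, Nat.succ_eq_add_one, List.getD_cons_succ, List.getD_cons_zero]
        rw [ih d]
        simp [specG, hd]
      · have hd' : (d == '(') = false := by simp [hd]
        simp only [hd', Bool.false_eq_true, if_false, List.nil_append, List.any_map,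
          Function.comp_def, Nat.succ_eq_add_one, List.getD_cons_succ]
        rw [ih d]
        simp [specG, hd']

theorem specH_eq (s : List Char) :
    (((idxOpen s).drop 1).any fun k => !(s.getD (k - 1) ' ' == ')')) = specH s := by
  induction s with
  | nil => simp [idxOpen, specH]
  | cons c r ih =>
      rw [idxOpen_cons]
      by_cases hc : c = '('
      · have hc' : (c == '(') = true := by simp [hc]
        simp only [hc', if_true, List.singleton_append, List.drop_succ_cons, List.drop_zero,
          List.any_map, Function.comp_def, Nat.succ_eq_add_one, Nat.add_sub_cancel]
        rw [specG_eq r c]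
        simp [specH, hc']
      · have hc' : (c == '(') = false := by simp [hc]
        simp only [hc', Bool.false_eq_true, if_false, List.nil_append, ← List.map_drop,
          List.any_map, Function.comp_def, Nat.succ_eq_add_one, Nat.add_sub_cancel]
        rw [PySem.List.any_congr_mem (g := fun k => !(r.getD (k - 1) ' ' == ')'))]
        · rw [ih]; simp [specH, hc']
        · intro k hk
          have h1 : 1 ≤ k := idxOpen_drop_pos r k hk
          have he : (c :: r).getD k ' ' = r.getD (k - 1) ' ' := by
            cases k with
            | zero => omega
            | succ m => simp
          rw [he]

theorem coorB_loop_eq (l : List Char) : ∀ (seen : Bool) (prev : Option Char) (r : Option Int),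
    (r = none ∨ r = some 0) →
    (coorB_loop l seen prev r).getD 0
      = if (if seen then specG prev l else specH l) then 1 else 0 := by
  induction l with
  | nil =>
      intro seen prev r hr
      rcases hr with rfl | rfl <;> cases seen <;> simp [coorB_loop, specG, specH]
  | cons c rest ih =>
      intro seen prev r hr
      rw [coorB_loop]
      by_cases hc : c = '('
      · have hc' : (c == '(') = true := by simp [hc]
        cases seen with
        | false =>
            simp only [hc', Bool.and_false, Bool.false_eq_true, if_false]
            rw [ih _ _ _ hr]
            simp [specH, hc']
        | true =>
            by_cases hp : prev = some ')'
            · have hp' : (prev == some ')') = true := by simp [hp]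
              simp only [hc', Bool.and_true, if_true, hp', Bool.not_true, Bool.false_eq_true, if_false]
              rw [if_neg (by simp), ih _ _ _ (Or.inr rfl)]
              simp [specG, hp']
            · have hp' : (prev == some ')') = false := by simp [hp]
              simp only [hc', Bool.and_true, if_true, hp', Bool.not_false]
              rw [if_pos (by norm_num)]
              simp [specG, hc', hp']
      · have hc' : (c == '(') = false := by simp [hc]
        simp only [hc', Bool.false_and, Bool.false_eq_true, if_false]
        rw [ih _ _ _ hr]
        cases seen <;> simp [specG, specH, hc']

set_option maxHeartbeats 1000000 in
theorem ports_agree (coordinates : String) :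
    coor_check2 coordinates = coor_check2_alt coordinates := by
  simp only [coor_check2, coor_check2_alt]
  rw [space_eq, PySem.List.slice_from _ (by norm_num), Int.toNat_one, ← List.map_drop]
  have hmatch : ∀ o : Option Int, (match o with | some r => r | none => 0) = o.getD 0 :=
    fun o => by cases o <;> rfl
  rw [hmatch, hmatch, coorA_loop_map _ _ (idxOpen_drop_pos _), specH_eq,
    coorB_loop_eq _ _ _ _ (Or.inl rfl)]
  simp

-- ===== VERDICT (by name: the statement is the Claim_ definition above) =====
theorem coor_check2_spec : Claim_equal_coor_check2 := by
  intro coordinates _ _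
  unfold Spec_coor_check2
  exact ports_agree coordinates
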